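-- pv_equiv track=rewrite | github.com/jj1985/autonomous-dev | plugins/autonomous-dev/lib/prompt_quality_rules.py | check_constraint_density
-- ===== SOURCE A (Python) =====
-- from typing import List
--
-- CONSTRAINT_DENSITY_THRESHOLD = 8
--
-- def check_constraint_density(
--     content: str, threshold: int = CONSTRAINT_DENSITY_THRESHOLD
-- ) -> List[str]:
--     """Check for oversized constraint sections.
--
--     Counts bullet items (lines starting with - or *) per ## section.
--     Sections exceeding the threshold are flagged.
--
--     Args:
--         content: Full text content to check.
--         threshold: Maximum allowed bullet items per section.
--
--     Returns:
--         List of violation descriptions (empty if no violations).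
--     """
--     violations: List[str] = []
--     lines = content.split("\n")
--
--     current_section: str = "(top-level)"
--     section_start_line: int = 1
--     bullet_count: int = 0
--
--     for i, line in enumerate(lines):
--         stripped = line.strip()
--         # Detect ## section headers (not # or ###)
--         if stripped.startswith("## ") and not stripped.startswith("### "):
--             # Check previous section before moving to next
--             if bullet_count > threshold:
--                 violations.append(
--                     f"Section '{current_section}' (line {section_start_line}): "
--                     f"{bullet_count} bullet items exceeds threshold of {threshold}."
--                 )
--             current_section = stripped.lstrip("# ").strip()
--             section_start_line = i + 1
--             bullet_count = 0
--         elif stripped.startswith("- ") or stripped.startswith("* "):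
--             bullet_count += 1
--
--     # Check final section
--     if bullet_count > threshold:
--         violations.append(
--             f"Section '{current_section}' (line {section_start_line}): "
--             f"{bullet_count} bullet items exceeds threshold of {threshold}."
--         )
--
--     return violations
-- ===== SOURCE B (Python) =====
-- from typing import List
--
-- CONSTRAINT_DENSITY_THRESHOLD = 8
--
--
-- def check_constraint_density(
--     content: str, threshold: int = CONSTRAINT_DENSITY_THRESHOLD
-- ) -> List[str]:
--     """Two-pass version: first group lines into section records
--     (name, start_line, bullet_count), then format violations."""
--     lines = content.split("\n")
--     sections = [("(top-level)", 1, 0)]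
--     for i, line in enumerate(lines):
--         s = line.strip()
--         if s.startswith("## ") and not s.startswith("### "):
--             sections.append((s.lstrip("# ").strip(), i + 1, 0))
--         elif s.startswith("- ") or s.startswith("* "):
--             name, start, count = sections[-1]
--             sections[-1] = (name, start, count + 1)
--     return [
--         f"Section '{name}' (line {start}): "
--         f"{count} bullet items exceeds threshold of {threshold}."
--         for name, start, count in sections
--         if count > threshold
--     ]
-- ===== Notes on version B (the rewrite author's own statement) =====
-- stated objective: alternative
-- what changed: B separates grouping from reporting: a first pass builds a list of section records (name, start_line, bullet_count) and a second pass formats a violation for each record over the threshold, instead of A's single pass that interleaves counting with violation emission.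
import Mathlib
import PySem

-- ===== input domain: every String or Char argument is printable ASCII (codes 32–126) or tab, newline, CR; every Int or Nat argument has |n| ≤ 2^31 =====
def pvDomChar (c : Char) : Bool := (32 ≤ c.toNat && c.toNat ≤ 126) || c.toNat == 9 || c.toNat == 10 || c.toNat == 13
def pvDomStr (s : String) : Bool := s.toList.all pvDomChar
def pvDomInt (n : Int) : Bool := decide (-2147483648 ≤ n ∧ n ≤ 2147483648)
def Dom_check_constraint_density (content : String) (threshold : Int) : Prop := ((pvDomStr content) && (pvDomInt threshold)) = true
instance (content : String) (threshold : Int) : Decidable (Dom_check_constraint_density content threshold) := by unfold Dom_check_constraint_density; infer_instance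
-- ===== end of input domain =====

-- B is an 'alternative' decomposition: one pass builds section records, a second pass formats
-- the violations; A emits violations inline during its single counting pass. Same cost.

-- shared line predicates / formatting (both Python versions contain these identical expressions)
def pvHeader (s : List Char) : Bool :=
  PySem.Chars.startswith s "## ".toList && ! PySem.Chars.startswith s "### ".toList

def pvBullet (s : List Char) : Bool :=
  PySem.Chars.startswith s "- ".toList || PySem.Chars.startswith s "* ".toList

-- stripped.lstrip("# ").strip(): lstrip(chars) is ported by hand as dropWhile over {'#',' '} (exact)
def pvName (s : List Char) : String :=
  String.ofList (PySem.Chars.strip (s.dropWhile (fun c => c == '#' || c == ' ')))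

-- the f-string "Section '{name}' (line {start}): {count} bullet items exceeds threshold of {threshold}."
def pvFmt (name : String) (start : Int) (count : Int) (threshold : Int) : String :=
  "Section '" ++ name ++ "' (line " ++ PySem.Int.toStr start ++ "): " ++
    PySem.Int.toStr count ++ " bullet items exceeds threshold of " ++
    PySem.Int.toStr threshold ++ "."

-- content.split("\n"): PySem.Str.split? is some for the nonempty literal separator, so .getD [] is exact
-- ===== PORT A =====
-- loop body of A: state = (violations, current_section, section_start_line, bullet_count)
def pvStepA (threshold : Int) (acc : List String × String × Int × Int) (p : Int × String) :
    List String × String × Int × Int :=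
  let s := PySem.Chars.strip p.2.toList
  if pvHeader s then
    ((if acc.2.2.2 > threshold then acc.1 ++ [pvFmt acc.2.1 acc.2.2.1 acc.2.2.2 threshold] else acc.1),
      pvName s, p.1 + 1, 0)
  else if pvBullet s then (acc.1, acc.2.1, acc.2.2.1, acc.2.2.2 + 1)
  else acc

def check_constraint_density (content : String) (threshold : Int) : List String :=
  let st := (PySem.List.enumerate (((PySem.Str.split? content "\n").getD [])) 0).foldl
    (pvStepA threshold) ([], "(top-level)", 1, 0)
  if st.2.2.2 > threshold then st.1 ++ [pvFmt st.2.1 st.2.2.1 st.2.2.2 threshold] else st.1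

-- ===== PORT B =====
-- loop body of B's first pass: state = (finished records, current record (name, start, count))
def pvStepB (acc : List (String × Int × Int) × (String × Int × Int)) (p : Int × String) :
    List (String × Int × Int) × (String × Int × Int) :=
  let s := PySem.Chars.strip p.2.toList
  if pvHeader s then (acc.1 ++ [acc.2], (pvName s, p.1 + 1, 0))
  else if pvBullet s then (acc.1, (acc.2.1, acc.2.2.1, acc.2.2.2 + 1))
  else acc

-- B's second pass: the list comprehension with its filter
def pvFlag (threshold : Int) (r : String × Int × Int) : Option String :=
  if r.2.2 > threshold then some (pvFmt r.1 r.2.1 r.2.2 threshold) else none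

def check_constraint_density_alt (content : String) (threshold : Int) : List String :=
  let st := (PySem.List.enumerate (((PySem.Str.split? content "\n").getD [])) 0).foldl
    pvStepB ([], ("(top-level)", 1, 0))
  (st.1 ++ [st.2]).filterMap (pvFlag threshold)

-- ===== PRECONDITION & SPEC =====
def Spec_check_constraint_density (content : String) (threshold : Int) (out : List String) : Prop := out = check_constraint_density_alt content threshold
instance (content : String) (threshold : Int) (out : List String) : Decidable (Spec_check_constraint_density content threshold out) := by unfold Spec_check_constraint_density; infer_instance

-- ===== CLAIM (what is proved, stated in full; the proofs are below) =====
def Claim_equal_check_constraint_density : Prop := ∀ (content : String) (threshold : Int), Dom_check_constraint_density content threshold → Spec_check_constraint_density content threshold (check_constraint_density content threshold)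

-- ===== LEMMAS AND PROOFS =====

-- the two folds stay in lockstep: A's violation list is the flagged image of B's finished records
lemma pv_fold_rel (th : Int) (ps : List (Int × String)) :
    ∀ (done : List (String × Int × Int)) (cur : String × Int × Int),
    ps.foldl (pvStepA th) (done.filterMap (pvFlag th), cur.1, cur.2.1, cur.2.2) =
      ((ps.foldl pvStepB (done, cur)).1.filterMap (pvFlag th),
       (ps.foldl pvStepB (done, cur)).2.1,
       (ps.foldl pvStepB (done, cur)).2.2.1,
       (ps.foldl pvStepB (done, cur)).2.2.2) := by
  induction ps with
  | nil => intro done cur; rfl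
  | cons p ps ih =>
    intro done cur
    simp only [List.foldl_cons]
    by_cases hh : pvHeader (PySem.Chars.strip p.2.toList) = true
    · have hA : pvStepA th (done.filterMap (pvFlag th), cur.1, cur.2.1, cur.2.2) p =
          ((done ++ [cur]).filterMap (pvFlag th), pvName (PySem.Chars.strip p.2.toList), p.1 + 1, 0) := by
        simp only [pvStepA, hh, if_true, List.filterMap_append, List.filterMap_cons,
          List.filterMap_nil, pvFlag]
        split_ifs <;> simp
      rw [hA]
      have := ih (done ++ [cur]) (pvName (PySem.Chars.strip p.2.toList), p.1 + 1, 0)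
      simpa [pvStepB, hh] using this
    · by_cases hb : pvBullet (PySem.Chars.strip p.2.toList) = true
      · have hA : pvStepA th (done.filterMap (pvFlag th), cur.1, cur.2.1, cur.2.2) p =
            (done.filterMap (pvFlag th), cur.1, cur.2.1, cur.2.2 + 1) := by
          simp [pvStepA, hh, hb]
        rw [hA]
        have := ih done (cur.1, cur.2.1, cur.2.2 + 1)
        simpa [pvStepB, hh, hb] using this
      · have hA : pvStepA th (done.filterMap (pvFlag th), cur.1, cur.2.1, cur.2.2) p =
            (done.filterMap (pvFlag th), cur.1, cur.2.1, cur.2.2) := by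
          simp [pvStepA, hh, hb]
        rw [hA]
        have := ih done cur
        simpa [pvStepB, hh, hb] using this

-- ===== VERDICT (by name: the statement is the Claim_ definition above) =====
theorem check_constraint_density_spec : Claim_equal_check_constraint_density := by
  intro content threshold _
  unfold Spec_check_constraint_density check_constraint_density check_constraint_density_alt
  have h := pv_fold_rel threshold (PySem.List.enumerate (((PySem.Str.split? content "\n").getD [])) 0)
    [] ("(top-level)", 1, 0)
  simp only [List.filterMap_nil] at h
  rw [h]
  simp only [List.filterMap_append, List.filterMap_cons, List.filterMap_nil, pvFlag]
  split_ifs <;> simp
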